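-- pv_equiv track=rewrite | github.com/xucian/diagnosaurus.ai | services/lightpanda_service.py | _clean_medical_content
-- ===== SOURCE A (Python) =====
-- def _clean_medical_content(content: str) -> str:
--     """
--     Clean medical content from common artifacts
--
--     Args:
--         content: Raw scraped content
--
--     Returns:
--         Cleaned content
--     """
--     # Remove common navigation/footer text
--     noise_patterns = [
--         "Cookie Policy",
--         "Privacy Policy",
--         "Terms of Service",
--         "Subscribe to our newsletter",
--         "Share on Facebook",
--         "Share on Twitter",
--     ]
--
--     for pattern in noise_patterns:
--         content = content.replace(pattern, "")
--
--     return content.strip()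
-- ===== SOURCE B (Python) =====
-- _NOISE_PATTERNS = (
--     "Cookie Policy",
--     "Privacy Policy",
--     "Terms of Service",
--     "Subscribe to our newsletter",
--     "Share on Facebook",
--     "Share on Twitter",
-- )
--
--
-- def _clean_medical_content(content: str) -> str:
--     """Clean medical content from common artifacts (recursive split/join form)."""
--
--     def _scrub(text, patterns):
--         if not patterns:
--             return text
--         return _scrub("".join(text.split(patterns[0])), patterns[1:])
--
--     return _scrub(content, _NOISE_PATTERNS).strip()
-- ===== Notes on version B (the rewrite author's own statement) =====
-- stated objective: alternative
-- what changed: Replaces the imperative for-loop of replace(pattern, empty) passes by a recursion over the pattern tuple that removes each pattern by splitting the text on it and re-joining the pieces, keeping the final strip.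
import Mathlib
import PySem

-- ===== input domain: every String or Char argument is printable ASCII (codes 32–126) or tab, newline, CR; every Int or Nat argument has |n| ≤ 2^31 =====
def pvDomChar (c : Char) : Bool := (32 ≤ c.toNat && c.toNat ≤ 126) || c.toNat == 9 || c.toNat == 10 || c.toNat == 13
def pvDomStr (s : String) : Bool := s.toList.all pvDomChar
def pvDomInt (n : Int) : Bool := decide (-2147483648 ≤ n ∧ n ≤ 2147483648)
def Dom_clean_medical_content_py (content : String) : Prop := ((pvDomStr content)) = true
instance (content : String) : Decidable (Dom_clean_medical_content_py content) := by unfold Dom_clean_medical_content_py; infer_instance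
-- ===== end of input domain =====

-- B replaces A's imperative loop of replace() passes by a recursion over the pattern list
-- using split-on-pattern + re-join; same cost, different decomposition (objective: alternative).

-- ===== PORT A =====
def pvNoisePatternsA : List String :=
  ["Cookie Policy", "Privacy Policy", "Terms of Service",
   "Subscribe to our newsletter", "Share on Facebook", "Share on Twitter"]

def clean_medical_content_py (content : String) : String :=
  PySem.Str.strip (pvNoisePatternsA.foldl (fun c p => PySem.Str.replace c p "") content)

-- ===== PORT B ===== (same literal pattern list; B's Python keeps it as a module-level tuple)
def pvScrub : String → List String → String
  | text, [] => text
  | text, p :: ps => pvScrub (PySem.Str.join "" ((PySem.Str.split? text p).getD [])) ps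

def clean_medical_content_py_alt (content : String) : String :=
  PySem.Str.strip (pvScrub content pvNoisePatternsA)

-- ===== PRECONDITION & SPEC =====
def Spec_clean_medical_content_py (content : String) (out : String) : Prop := out = clean_medical_content_py_alt content
instance (content : String) (out : String) : Decidable (Spec_clean_medical_content_py content out) := by unfold Spec_clean_medical_content_py; infer_instance

-- ===== CLAIM (what is proved, stated in full; the proofs are below) =====
def Claim_equal_clean_medical_content_py : Prop := ∀ (content : String), Dom_clean_medical_content_py content → Spec_clean_medical_content_py content (clean_medical_content_py content)

-- ===== LEMMAS AND PROOFS =====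

-- replace.go is accumulator-linear
lemma pv_repl_go_acc (old new : List Char) :
    ∀ (fuel : Nat) (l acc : List Char),
      PySem.Chars.replace.go old new fuel l acc = acc.reverse ++ PySem.Chars.replace.go old new fuel l [] := by
  intro fuel
  induction fuel with
  | zero =>
    intro l acc
    rw [PySem.Chars.replace.go.eq_def, PySem.Chars.replace.go.eq_def]
    simp
  | succ n ih =>
    intro l acc
    cases l with
    | nil =>
      rw [PySem.Chars.replace.go.eq_def, PySem.Chars.replace.go.eq_def]
      simp
    | cons c t =>
      rw [PySem.Chars.replace.go.eq_def old new (n + 1) (c :: t) acc,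
          PySem.Chars.replace.go.eq_def old new (n + 1) (c :: t) []]
      simp only []
      split_ifs with h
      · rw [ih (List.drop old.length (c :: t)) (new.reverse ++ acc),
            ih (List.drop old.length (c :: t)) (new.reverse ++ [])]
        simp
      · rw [ih t (c :: acc), ih t [c]]
        simp

-- enough fuel: one more unit of fuel changes nothing (old nonempty)
lemma pv_repl_go_fuel (old new : List Char) (hold : old ≠ []) :
    ∀ (fuel : Nat) (l acc : List Char), l.length ≤ fuel →
      PySem.Chars.replace.go old new (fuel + 1) l acc = PySem.Chars.replace.go old new fuel l acc := by
  intro fuel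
  induction fuel with
  | zero =>
    intro l acc hl
    have : l = [] := List.length_eq_zero_iff.mp (Nat.le_zero.mp hl)
    subst this
    rw [PySem.Chars.replace.go.eq_def, PySem.Chars.replace.go.eq_def]
    simp
  | succ n ih =>
    intro l acc hl
    cases l with
    | nil =>
      rw [PySem.Chars.replace.go.eq_def, PySem.Chars.replace.go.eq_def]
    | cons c t =>
      rw [PySem.Chars.replace.go.eq_def old new (n + 1 + 1) (c :: t) acc,
          PySem.Chars.replace.go.eq_def old new (n + 1) (c :: t) acc]
      simp only []
      split_ifs with h
      · apply ih
        have h1 : 1 ≤ old.length := List.length_pos_iff.mpr hold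
        simp only [List.length_drop, List.length_cons] at hl ⊢
        omega
      · apply ih
        simp only [List.length_cons] at hl
        omega

-- join-with-empty is flatten
lemma pv_join_nil (xs : List (List Char)) : PySem.Chars.join [] xs = xs.flatten := by
  unfold PySem.Chars.join
  induction xs with
  | nil => simp [List.intercalate]
  | cons a t ih =>
    cases t with
    | nil => simp [List.intercalate]
    | cons b u =>
      simp only [List.intercalate, List.intersperse] at ih ⊢
      simp_all

-- the split-then-flatten loop computes exactly the replace-by-empty loop
lemma pv_split_join (sep : List Char) :
    ∀ (fuel : Nat) (l cur : List Char) (acc : List (List Char)),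
      PySem.Chars.join [] (PySem.Chars.splitOn.go sep fuel l cur acc)
        = acc.reverse.flatten ++ cur.reverse ++ PySem.Chars.replace.go sep [] fuel l [] := by
  intro fuel
  induction fuel with
  | zero =>
    intro l cur acc
    rw [PySem.Chars.splitOn.go.eq_def, PySem.Chars.replace.go.eq_def]
    simp [pv_join_nil]
  | succ n ih =>
    intro l cur acc
    cases l with
    | nil =>
      rw [PySem.Chars.splitOn.go.eq_def, PySem.Chars.replace.go.eq_def]
      simp [pv_join_nil]
    | cons c t =>
      rw [PySem.Chars.splitOn.go.eq_def sep (n + 1) (c :: t) cur acc,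
          PySem.Chars.replace.go.eq_def sep [] (n + 1) (c :: t) []]
      simp only []
      split_ifs with h
      · rw [ih (List.drop sep.length (c :: t)) [] (cur.reverse :: acc)]
        simp
      · rw [ih t (c :: cur) acc, pv_repl_go_acc sep [] n t [c]]
        simp

-- per-pattern step, list level: join "" (s.split(sep)) = s.replace(sep, "")
lemma pv_step_chars (s sep : List Char) (h : sep ≠ []) :
    PySem.Chars.join [] (PySem.Chars.splitOn s sep) = PySem.Chars.replace s sep [] := by
  unfold PySem.Chars.splitOn PySem.Chars.replace
  rw [if_neg (by simpa using h)]
  rw [pv_split_join sep (s.length + 1) s [] []]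
  rw [pv_repl_go_fuel sep [] h s.length s [] (le_refl _)]
  simp

-- per-pattern step, string level
lemma pv_step_str (s p : String) (hp : p.toList ≠ []) :
    PySem.Str.join "" ((PySem.Str.split? s p).getD []) = PySem.Str.replace s p "" := by
  rw [← String.toList_inj]
  rw [PySem.Str.toList_replace]
  unfold PySem.Str.split?
  unfold PySem.Chars.split?
  rw [if_neg (by simpa using hp)]
  rw [Option.map_some, Option.getD_some]
  rw [PySem.Str.toList_join]
  simp only [List.map_map]
  have : (PySem.Chars.splitOn s.toList p.toList).map (String.toList ∘ String.ofList)
       = PySem.Chars.splitOn s.toList p.toList := by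
    simp [Function.comp_def, String.toList_ofList]
  rw [this]
  have hnil : ("" : String).toList = [] := rfl
  rw [hnil]
  exact pv_step_chars s.toList p.toList hp

-- the recursion over patterns equals the foldl of replace passes
lemma pv_fold (ps : List String) (h : ∀ p ∈ ps, p.toList ≠ []) :
    ∀ (c : String), pvScrub c ps = ps.foldl (fun c p => PySem.Str.replace c p "") c := by
  induction ps with
  | nil => intro c; rfl
  | cons p t ih =>
    intro c
    simp only [pvScrub, List.foldl_cons]
    rw [pv_step_str c p (h p (List.mem_cons_self))]
    exact ih (fun q hq => h q (List.mem_cons_of_mem _ hq)) _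

-- ===== VERDICT (by name: the statement is the Claim_ definition above) =====
theorem clean_medical_content_py_spec : Claim_equal_clean_medical_content_py := by
  intro content _
  unfold Spec_clean_medical_content_py clean_medical_content_py clean_medical_content_py_alt
  rw [pv_fold pvNoisePatternsA (by decide) content]
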